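-- pv_equiv track=rewrite | github.com/Aaryaman09/semi_automatic_ner | source_code/pull_data/pull_data_from_source.py | generate_tokens_and_tags
-- ===== SOURCE A (Python) =====
-- from typing import Dict, List, Tuple
--
-- def generate_tokens_and_tags(text_data:List[str], seperator:str):
--     tokens = []
--     tags = []
--
--     temp_tokens = []
--     temp_tags = []
--
--     for line in text_data:
--         if line != "":
--             tag, token = line.strip().split(seperator)
--             temp_tokens.append(tag)
--             temp_tags.append(token)
--         else:
--             tokens.append(temp_tokens)
--             tags.append(temp_tags)
--
--             temp_tags, temp_tokens = [], []
--
--     return tokens, tags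
-- ===== SOURCE B (Python) =====
-- def generate_tokens_and_tags(text_data, seperator):
--     # Pass 1: group the non-empty lines into blocks, one block per empty line
--     # (a trailing block not terminated by an empty line is never emitted, as in A).
--     blocks = []
--     current = []
--     for line in text_data:
--         if line == "":
--             blocks.append(current)
--             current = []
--         else:
--             current.append(line)
--     # Pass 2: split each block's lines into paired token/tag lists.
--     tokens = []
--     tags = []
--     for block in blocks:
--         temp_tokens = []
--         temp_tags = []
--         for line in block:
--             tag, token = line.strip().split(seperator)
--             temp_tokens.append(tag)
--             temp_tags.append(token)
--         tokens.append(temp_tokens)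
--         tags.append(temp_tags)
--     return tokens, tags
-- ===== Notes on version B (the rewrite author's own statement) =====
-- stated objective: alternative
-- what changed: Replaces A's single loop carrying four parallel accumulators with a two-pass decomposition: first group lines into blocks delimited by empty lines (never emitting an unterminated trailing block), then split each block's lines into its token/tag pair lists.
import Mathlib
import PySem

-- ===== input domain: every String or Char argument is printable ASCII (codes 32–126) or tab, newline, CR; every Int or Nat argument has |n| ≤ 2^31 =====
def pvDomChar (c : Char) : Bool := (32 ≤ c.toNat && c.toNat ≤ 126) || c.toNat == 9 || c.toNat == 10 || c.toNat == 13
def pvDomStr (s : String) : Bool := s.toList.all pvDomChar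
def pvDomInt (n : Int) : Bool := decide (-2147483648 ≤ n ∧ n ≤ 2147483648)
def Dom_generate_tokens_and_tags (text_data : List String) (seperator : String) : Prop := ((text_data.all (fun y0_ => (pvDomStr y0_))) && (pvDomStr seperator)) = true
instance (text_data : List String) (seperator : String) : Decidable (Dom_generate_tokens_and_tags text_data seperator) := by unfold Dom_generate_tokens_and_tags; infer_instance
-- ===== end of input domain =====

-- B re-implements A as a two-pass decomposition (group lines into blocks delimited by empty
-- lines, then split each block into its token/tag pair lists); same return value, no speed claim.


-- ===== PORT A =====
-- A's single loop carrying (tokens, tags, temp_tokens, temp_tags).  The 2-unpack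
-- `tag, token = line.strip().split(seperator)` is ported via getD; it is exact under
-- Pre_ (the split yields exactly two parts there, and seperator ≠ "").
def pvStepA (seperator : String)
    (st : List (List String) × List (List String) × List String × List String)
    (line : String) : List (List String) × List (List String) × List String × List String :=
  if line ≠ "" then
    (st.1, st.2.1,
     st.2.2.1 ++ [((PySem.Str.split? (PySem.Str.strip line) seperator).getD []).getD 0 ""],
     st.2.2.2 ++ [((PySem.Str.split? (PySem.Str.strip line) seperator).getD []).getD 1 ""])
  else
    (st.1 ++ [st.2.2.1], st.2.1 ++ [st.2.2.2], [], [])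

def generate_tokens_and_tags (text_data : List String) (seperator : String) : List (List String) × List (List String) :=
  let st := text_data.foldl (pvStepA seperator) ([], [], [], [])
  (st.1, st.2.1)

-- ===== PORT B =====
-- pass 1: group lines into blocks, one block per empty line (trailing unterminated block dropped)
def pvStepBlock (st : List (List String) × List String) (line : String) :
    List (List String) × List String :=
  if line = "" then (st.1 ++ [st.2], []) else (st.1, st.2 ++ [line])

-- pass 2, inner loop: split one block's lines into its (temp_tokens, temp_tags)
def pvProcBlock (seperator : String) (block : List String) : List String × List String :=
  block.foldl (fun st line =>
    (st.1 ++ [((PySem.Str.split? (PySem.Str.strip line) seperator).getD []).getD 0 ""],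
     st.2 ++ [((PySem.Str.split? (PySem.Str.strip line) seperator).getD []).getD 1 ""])) ([], [])

def generate_tokens_and_tags_alt (text_data : List String) (seperator : String) : List (List String) × List (List String) :=
  let blocks := (text_data.foldl pvStepBlock ([], [])).1
  blocks.foldl (fun st b =>
    (st.1 ++ [(pvProcBlock seperator b).1], st.2 ++ [(pvProcBlock seperator b).2])) ([], [])

-- ===== PRECONDITION & SPEC =====
-- Pre_ excludes exactly the inputs where Python A raises ValueError: an empty separator,
-- or a non-empty line whose stripped form does not split into exactly two parts.
def Pre_generate_tokens_and_tags (text_data : List String) (seperator : String) : Prop :=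
  ∀ line ∈ text_data, line ≠ "" →
    seperator ≠ "" ∧ ((PySem.Str.split? (PySem.Str.strip line) seperator).getD []).length = 2
instance (text_data : List String) (seperator : String) : Decidable (Pre_generate_tokens_and_tags text_data seperator) := by unfold Pre_generate_tokens_and_tags; infer_instance

def pvWitness_generate_tokens_and_tags : List String × String :=
  ([" a:b ", "x:y", "", "p:q", ""], ":")

def Spec_generate_tokens_and_tags (text_data : List String) (seperator : String) (out : List (List String) × List (List String)) : Prop := out = generate_tokens_and_tags_alt text_data seperator
instance (text_data : List String) (seperator : String) (out : List (List String) × List (List String)) : Decidable (Spec_generate_tokens_and_tags text_data seperator out) := by unfold Spec_generate_tokens_and_tags; infer_instance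

-- ===== CLAIM (what is proved, stated in full; the proofs are below) =====
def Claim_equal_generate_tokens_and_tags : Prop := ∀ (text_data : List String) (seperator : String), Dom_generate_tokens_and_tags text_data seperator → Pre_generate_tokens_and_tags text_data seperator → Spec_generate_tokens_and_tags text_data seperator (generate_tokens_and_tags text_data seperator)

-- ===== LEMMAS AND PROOFS =====

-- the block fold's block-list accumulator factors out
lemma pvBlocks_acc (td : List String) (bs : List (List String)) (cur : List String) :
    td.foldl pvStepBlock (bs, cur)
      = (bs ++ (td.foldl pvStepBlock ([], cur)).1, (td.foldl pvStepBlock ([], cur)).2) := by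
  induction td generalizing bs cur with
  | nil => simp
  | cons line td ih =>
    by_cases h : line = ""
    · subst h
      rw [List.foldl_cons, List.foldl_cons]
      simp only [pvStepBlock, if_true, List.nil_append]
      rw [ih (bs ++ [cur]) [], ih [cur] []]
      simp
    · rw [List.foldl_cons, List.foldl_cons]
      simp only [pvStepBlock, if_neg h]
      exact ih bs (cur ++ [line])

-- B's outer fold over blocks is the pair of maps
lemma pvOuter_eq (sep : String) (bs : List (List String)) (t1 t2 : List (List String)) :
    bs.foldl (fun st b => (st.1 ++ [(pvProcBlock sep b).1], st.2 ++ [(pvProcBlock sep b).2])) (t1, t2)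
      = (t1 ++ bs.map (fun b => (pvProcBlock sep b).1), t2 ++ bs.map (fun b => (pvProcBlock sep b).2)) := by
  induction bs generalizing t1 t2 with
  | nil => simp
  | cons b bs ih => simp [List.foldl_cons, ih]

-- main invariant: A's fold state is determined by B's blocks-so-far and current block
lemma pvMain (sep : String) (td : List String) (tokens tags : List (List String)) (cur : List String) :
    td.foldl (pvStepA sep) (tokens, tags, (pvProcBlock sep cur).1, (pvProcBlock sep cur).2)
      = (tokens ++ ((td.foldl pvStepBlock ([], cur)).1).map (fun b => (pvProcBlock sep b).1),
         tags ++ ((td.foldl pvStepBlock ([], cur)).1).map (fun b => (pvProcBlock sep b).2),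
         (pvProcBlock sep (td.foldl pvStepBlock ([], cur)).2).1,
         (pvProcBlock sep (td.foldl pvStepBlock ([], cur)).2).2) := by
  induction td generalizing tokens tags cur with
  | nil => simp
  | cons line td ih =>
    by_cases h : line = ""
    · subst h
      have stA : pvStepA sep (tokens, tags, (pvProcBlock sep cur).1, (pvProcBlock sep cur).2) ""
          = (tokens ++ [(pvProcBlock sep cur).1], tags ++ [(pvProcBlock sep cur).2],
             (pvProcBlock sep ([] : List String)).1, (pvProcBlock sep ([] : List String)).2) := by
        simp [pvStepA, pvProcBlock]
      rw [List.foldl_cons, stA, ih, List.foldl_cons]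
      simp only [pvStepBlock, if_true, List.nil_append]
      rw [pvBlocks_acc td [cur] []]
      simp
    · have stA : pvStepA sep (tokens, tags, (pvProcBlock sep cur).1, (pvProcBlock sep cur).2) line
          = (tokens, tags, (pvProcBlock sep (cur ++ [line])).1, (pvProcBlock sep (cur ++ [line])).2) := by
        simp [pvStepA, h, pvProcBlock, List.foldl_append]
      rw [List.foldl_cons, stA, ih, List.foldl_cons]
      simp only [pvStepBlock, if_neg h]

-- ===== VERDICT (by name: the statement is the Claim_ definition above) =====
theorem generate_tokens_and_tags_spec : Claim_equal_generate_tokens_and_tags := by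
  intro td sep _ _
  unfold Spec_generate_tokens_and_tags
  have h0 : pvProcBlock sep [] = ([], []) := rfl
  have h := pvMain sep td [] [] []
  rw [h0] at h
  simp [generate_tokens_and_tags, generate_tokens_and_tags_alt, h, pvOuter_eq]
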